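-- pv_equiv track=rewrite | github.com/dronpancholi/BuildIT-Platform | backend/src/seo_platform/services/backlink_acquisition_intelligence.py | _heuristic_intent_classification
-- ===== SOURCE A (Python) =====
-- def _heuristic_intent_classification(domain: str) -> tuple[str, list[str]]:
--     evidence: list[str] = []
--     editorial_signals = ["blog", "magazine", "news", "journal", "review", "opinion", "editorial"]
--     resource_signals = ["resource", "links", "directory", "curation", "collection", "best", "top"]
--     directory_signals = ["directory", "list", "business", "yellowpages", "catalog"]
--     review_signals = ["review", "rating", "testimonial", "trustpilot", "g2", "capterra"]
--
--     for s in editorial_signals: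
--         if s in domain:
--             evidence.append(f"editorial_signal:{s}")
--     for s in resource_signals:
--         if s in domain:
--             evidence.append(f"resource_signal:{s}")
--     for s in directory_signals:
--         if s in domain:
--             evidence.append(f"directory_signal:{s}")
--     for s in review_signals:
--         if s in domain:
--             evidence.append(f"review_signal:{s}")
--
--     if any(s in domain for s in review_signals):
--         return "review", evidence
--     if any(s in domain for s in directory_signals):
--         return "directory", evidence
--     if any(s in domain for s in editorial_signals):
--         return "editorial", evidence
--     if any(s in domain for s in resource_signals):
--         return "resource", evidence
--     return "unknown", ["no_clear_pattern_detected"]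
-- ===== SOURCE B (Python) =====
-- def _heuristic_intent_classification(domain: str) -> tuple[str, list[str]]:
--     table = [
--         ("editorial", ["blog", "magazine", "news", "journal", "review", "opinion", "editorial"]),
--         ("resource", ["resource", "links", "directory", "curation", "collection", "best", "top"]),
--         ("directory", ["directory", "list", "business", "yellowpages", "catalog"]),
--         ("review", ["review", "rating", "testimonial", "trustpilot", "g2", "capterra"]),
--     ]
--     # One left-to-right sweep over the domain's positions, testing every signal as a
--     # prefix at each position (naive multi-pattern matcher) -- no per-signal substring scans.
--     vocab = list(dict.fromkeys(s for _, sigs in table for s in sigs))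
--     found: set[str] = set()
--     for i in range(len(domain) + 1):
--         for s in vocab:
--             if s not in found and domain.startswith(s, i):
--                 found.add(s)
--     if not found:
--         return "unknown", ["no_clear_pattern_detected"]
--     # Reconstruct evidence and resolve the category purely from the found-signal set.
--     evidence = [f"{cat}_signal:{s}" for cat, sigs in table for s in sigs if s in found]
--     bycat = dict(table)
--     for cat in ("review", "directory", "editorial", "resource"):
--         if any(s in found for s in bycat[cat]):
--             return cat, evidence
--     return "unknown", ["no_clear_pattern_detected"]
-- ===== Notes on version B (the rewrite author's own statement) =====
-- stated objective: alternative
-- what changed: Replaces A's eight per-signal substring scans (four evidence loops plus four any() re-scans of the domain) with a single left-to-right sweep over the domain's positions that prefix-tests every signal at each position (a naive multi-pattern matcher building a found-signal set); evidence and the returned category are then reconstructed purely from that set, with no further scanning of the domain.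
import Mathlib
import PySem

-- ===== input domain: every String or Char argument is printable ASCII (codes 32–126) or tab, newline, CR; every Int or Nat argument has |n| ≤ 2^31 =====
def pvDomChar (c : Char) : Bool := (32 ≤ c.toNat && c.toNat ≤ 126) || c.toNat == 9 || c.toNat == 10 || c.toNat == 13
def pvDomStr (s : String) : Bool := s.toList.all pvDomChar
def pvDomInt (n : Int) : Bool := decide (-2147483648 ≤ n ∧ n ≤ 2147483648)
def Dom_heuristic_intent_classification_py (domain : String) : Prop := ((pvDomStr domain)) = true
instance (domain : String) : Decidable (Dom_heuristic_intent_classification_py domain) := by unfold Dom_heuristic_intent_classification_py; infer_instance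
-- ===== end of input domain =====

-- B replaces A's per-signal substring scans (each signal searched in the domain twice) by one
-- left-to-right sweep over the domain's positions that prefix-tests every signal at each position
-- (a naive multi-pattern matcher); evidence and the category are then reconstructed purely from
-- the resulting found-signal set (objective: alternative).

-- ===== PORT A =====
def heuristic_intent_classification_py (domain : String) : String × List String :=
  let editorial_signals : List String := ["blog", "magazine", "news", "journal", "review", "opinion", "editorial"]
  let resource_signals : List String := ["resource", "links", "directory", "curation", "collection", "best", "top"]
  let directory_signals : List String := ["directory", "list", "business", "yellowpages", "catalog"]
  let review_signals : List String := ["review", "rating", "testimonial", "trustpilot", "g2", "capterra"]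
  let evidence : List String :=
    editorial_signals.foldl (fun ev s => if PySem.Str.isIn s domain then ev ++ ["editorial_signal:" ++ s] else ev) []
  let evidence :=
    resource_signals.foldl (fun ev s => if PySem.Str.isIn s domain then ev ++ ["resource_signal:" ++ s] else ev) evidence
  let evidence :=
    directory_signals.foldl (fun ev s => if PySem.Str.isIn s domain then ev ++ ["directory_signal:" ++ s] else ev) evidence
  let evidence :=
    review_signals.foldl (fun ev s => if PySem.Str.isIn s domain then ev ++ ["review_signal:" ++ s] else ev) evidence
  if review_signals.any (fun s => PySem.Str.isIn s domain) then ("review", evidence)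
  else if directory_signals.any (fun s => PySem.Str.isIn s domain) then ("directory", evidence)
  else if editorial_signals.any (fun s => PySem.Str.isIn s domain) then ("editorial", evidence)
  else if resource_signals.any (fun s => PySem.Str.isIn s domain) then ("resource", evidence)
  else ("unknown", ["no_clear_pattern_detected"])

-- ===== PORT B =====
-- B-side helpers (Source B's `table`, `vocab` and the position-sweep building `found`)
def pvSignalTable : List (String × List String) :=
  [("editorial", ["blog", "magazine", "news", "journal", "review", "opinion", "editorial"]),
   ("resource", ["resource", "links", "directory", "curation", "collection", "best", "top"]),
   ("directory", ["directory", "list", "business", "yellowpages", "catalog"]),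
   ("review", ["review", "rating", "testimonial", "trustpilot", "g2", "capterra"])]

def pvVocab : List String := PySem.List.dedup (pvSignalTable.flatMap (fun cg => cg.2))

-- Python's domain.startswith(s, i) with 0 ≤ i ≤ len(domain) is exactly the prefix test on the
-- character list dropped at i (PySem.Chars.startswith), so this sweep is an exact port.
def pvFound (cs : List Char) : PySem.Set String :=
  (List.range (cs.length + 1)).foldl (fun f i =>
    pvVocab.foldl (fun f s =>
      if !PySem.Set.contains f s && PySem.Chars.startswith (cs.drop i) s.toList
      then PySem.Set.add f s else f) f) PySem.Set.empty

def heuristic_intent_classification_py_alt (domain : String) : String × List String :=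
  let found : PySem.Set String := pvFound domain.toList
  if found.isEmpty then ("unknown", ["no_clear_pattern_detected"])
  else
    let evidence : List String :=
      pvSignalTable.flatMap (fun cg =>
        (cg.2.filter (fun s => PySem.Set.contains found s)).map (fun s => (cg.1 ++ "_signal:") ++ s))
    let bycat := PySem.Dict.ofList pvSignalTable
    match (["review", "directory", "editorial", "resource"] : List String).find?
        (fun c => (bycat.getD c []).any (fun s => PySem.Set.contains found s)) with
    | some c => (c, evidence)
    | none => ("unknown", ["no_clear_pattern_detected"])

-- ===== PRECONDITION & SPEC =====
def Spec_heuristic_intent_classification_py (domain : String) (out : String × List String) : Prop := out = heuristic_intent_classification_py_alt domain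
instance (domain : String) (out : String × List String) : Decidable (Spec_heuristic_intent_classification_py domain out) := by unfold Spec_heuristic_intent_classification_py; infer_instance

-- ===== CLAIM (what is proved, stated in full; the proofs are below) =====
def Claim_equal_heuristic_intent_classification_py : Prop := ∀ (domain : String), Dom_heuristic_intent_classification_py domain → Spec_heuristic_intent_classification_py domain (heuristic_intent_classification_py domain)

-- ===== LEMMAS AND PROOFS =====

-- membership after the inner loop over the signals at one position
theorem pv_mem_inner (cs : List Char) (i : Nat) (vs : List String) (f : PySem.Set String) (y : String) :
    y ∈ vs.foldl (fun f s =>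
      if !PySem.Set.contains f s && PySem.Chars.startswith (cs.drop i) s.toList
      then PySem.Set.add f s else f) f ↔
    y ∈ f ∨ (y ∈ vs ∧ PySem.Chars.startswith (cs.drop i) y.toList = true) := by
  induction vs generalizing f with
  | nil => simp
  | cons s rest ih =>
    simp only [List.foldl_cons, ih, List.mem_cons]
    by_cases hc : PySem.Set.contains f s
    · have hf : s ∈ f := (PySem.Set.contains_iff f s).1 hc
      simp only [hc, Bool.not_true, Bool.false_and, Bool.false_eq_true, if_false]
      constructor
      · rintro (h | ⟨hr, hsw⟩)
        exacts [Or.inl h, Or.inr ⟨Or.inr hr, hsw⟩]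
      · rintro (h | ⟨(rfl | hr), hsw⟩)
        exacts [Or.inl h, Or.inl hf, Or.inr ⟨hr, hsw⟩]
    · by_cases hsw : PySem.Chars.startswith (cs.drop i) s.toList = true
      · simp only [Bool.not_eq_true] at hc
        simp only [hc, hsw, Bool.not_false, Bool.true_and, if_true, PySem.Set.mem_add]
        constructor
        · rintro ((h | rfl) | ⟨hr, hsw2⟩)
          exacts [Or.inl h, Or.inr ⟨Or.inl rfl, hsw⟩, Or.inr ⟨Or.inr hr, hsw2⟩]
        · rintro (h | ⟨(rfl | hr), hsw2⟩)
          exacts [Or.inl (Or.inl h), Or.inl (Or.inr rfl), Or.inr ⟨hr, hsw2⟩]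
      · simp only [Bool.not_eq_true] at hc
        simp only [hc, hsw, Bool.not_false, Bool.true_and, Bool.false_eq_true, if_false]
        constructor
        · rintro (h | ⟨hr, hsw2⟩)
          exacts [Or.inl h, Or.inr ⟨Or.inr hr, hsw2⟩]
        · rintro (h | ⟨(rfl | hr), hsw2⟩)
          exacts [Or.inl h, absurd hsw2 hsw, Or.inr ⟨hr, hsw2⟩]

-- membership after the whole sweep
theorem pv_mem_sweep (cs : List Char) (ps : List Nat) (f : PySem.Set String) (y : String) :
    y ∈ ps.foldl (fun f i =>
      pvVocab.foldl (fun f s =>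
        if !PySem.Set.contains f s && PySem.Chars.startswith (cs.drop i) s.toList
        then PySem.Set.add f s else f) f) f ↔
    y ∈ f ∨ (y ∈ pvVocab ∧ ∃ i ∈ ps, PySem.Chars.startswith (cs.drop i) y.toList = true) := by
  induction ps generalizing f with
  | nil => simp
  | cons i rest ih =>
    simp only [List.foldl_cons, ih, pv_mem_inner, List.mem_cons]
    constructor
    · rintro ((h | ⟨hv, hsw⟩) | ⟨hv, j, hj, hsw⟩)
      · tauto
      · exact Or.inr ⟨hv, i, Or.inl rfl, hsw⟩
      · exact Or.inr ⟨hv, j, Or.inr hj, hsw⟩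
    · rintro (h | ⟨hv, j, (rfl | hj), hsw⟩)
      · tauto
      · exact Or.inl (Or.inr ⟨hv, hsw⟩)
      · exact Or.inr ⟨hv, j, hj, hsw⟩

-- a prefix match at some position of the sweep is exactly a substring hit
theorem pv_exists_range (cs sub : List Char) :
    (∃ i ≤ cs.length, PySem.Chars.startswith (cs.drop i) sub = true) ↔
    PySem.Chars.isIn sub cs = true := by
  rw [← PySem.Chars.exists_prefix_drop_iff_isIn]
  constructor
  · rintro ⟨i, _, h⟩
    exact ⟨i, (PySem.Chars.startswith_iff _ _).1 h⟩
  · rintro ⟨j, hj⟩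
    by_cases hle : j ≤ cs.length
    · exact ⟨j, hle, (PySem.Chars.startswith_iff _ _).2 hj⟩
    · have hnil : cs.drop j = [] := List.drop_eq_nil_of_le (by omega)
      have hsub : sub = [] := List.prefix_nil.mp (hnil ▸ hj)
      exact ⟨0, by omega, (PySem.Chars.startswith_iff _ _).2 (by simp [hsub])⟩

theorem pv_mem_found (cs : List Char) (y : String) :
    y ∈ pvFound cs ↔ y ∈ pvVocab ∧ PySem.Chars.isIn y.toList cs = true := by
  unfold pvFound
  rw [pv_mem_sweep]
  simp [PySem.Set.empty, List.mem_range, pv_exists_range]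

theorem pv_contains_found (cs : List Char) (s : String) (hs : s ∈ pvVocab) :
    PySem.Set.contains (pvFound cs) s = PySem.Chars.isIn s.toList cs := by
  rw [Bool.eq_iff_iff, PySem.Set.contains_iff, pv_mem_found]
  simp [hs]

theorem pv_vocab_mem (s : String) :
    s ∈ pvVocab ↔ s ∈ ["blog", "magazine", "news", "journal", "review", "opinion", "editorial"]
      ∨ s ∈ ["resource", "links", "directory", "curation", "collection", "best", "top"]
      ∨ s ∈ ["directory", "list", "business", "yellowpages", "catalog"]
      ∨ s ∈ ["review", "rating", "testimonial", "trustpilot", "g2", "capterra"] := by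
  simp [pvVocab, pvSignalTable, List.flatMap]
  tauto

theorem pv_found_isEmpty (cs : List Char) :
    (pvFound cs).isEmpty =
      (!(["blog", "magazine", "news", "journal", "review", "opinion", "editorial"].any (fun s => PySem.Chars.isIn s.toList cs))
        && !(["resource", "links", "directory", "curation", "collection", "best", "top"].any (fun s => PySem.Chars.isIn s.toList cs))
        && !(["directory", "list", "business", "yellowpages", "catalog"].any (fun s => PySem.Chars.isIn s.toList cs))
        && !(["review", "rating", "testimonial", "trustpilot", "g2", "capterra"].any (fun s => PySem.Chars.isIn s.toList cs))) := by
  rw [Bool.eq_iff_iff]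
  simp only [List.isEmpty_iff, List.eq_nil_iff_forall_not_mem, pv_mem_found,
    Bool.and_eq_true, Bool.not_eq_true', List.any_eq_false, pv_vocab_mem]
  constructor
  · intro h
    refine ⟨⟨⟨?_, ?_⟩, ?_⟩, ?_⟩ <;> intro s hs <;>
      (by_cases hx : PySem.Chars.isIn s.toList cs = true
       · exact absurd ⟨by tauto, hx⟩ (h s)
       · simpa using hx)
  · rintro ⟨⟨⟨h1, h2⟩, h3⟩, h4⟩ s ⟨hv, hIn⟩
    rcases hv with h | h | h | h
    · exact absurd hIn (by simp [h1 s h])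
    · exact absurd hIn (by simp [h2 s h])
    · exact absurd hIn (by simp [h3 s h])
    · exact absurd hIn (by simp [h4 s h])

theorem any_eq_not_isEmpty_filter {α : Type} (l : List α) (p : α → Bool) :
    l.any p = !(l.filter p).isEmpty := by
  induction l with
  | nil => rfl
  | cons x xs ih => by_cases h : p x <;> simp [h, ih]

-- string-literal concatenation facts aligning B's "(cat ++ \"_signal:\") ++ s" with A's literals
theorem cat_editorial : ("editorial" ++ "_signal:" : String) = "editorial_signal:" := rfl
theorem cat_resource : ("resource" ++ "_signal:" : String) = "resource_signal:" := rfl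
theorem cat_directory : ("directory" ++ "_signal:" : String) = "directory_signal:" := rfl
theorem cat_review : ("review" ++ "_signal:" : String) = "review_signal:" := rfl

-- the dict(table) lookups of B's priority loop, computed
theorem bycat_review : (PySem.Dict.ofList pvSignalTable).getD "review" [] = ["review", "rating", "testimonial", "trustpilot", "g2", "capterra"] := rfl
theorem bycat_directory : (PySem.Dict.ofList pvSignalTable).getD "directory" [] = ["directory", "list", "business", "yellowpages", "catalog"] := rfl
theorem bycat_editorial : (PySem.Dict.ofList pvSignalTable).getD "editorial" [] = ["blog", "magazine", "news", "journal", "review", "opinion", "editorial"] := rfl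
theorem bycat_resource : (PySem.Dict.ofList pvSignalTable).getD "resource" [] = ["resource", "links", "directory", "curation", "collection", "best", "top"] := rfl

-- ===== VERDICT (by name: the statement is the Claim_ definition above) =====
set_option maxHeartbeats 1600000 in
theorem heuristic_intent_classification_py_spec : Claim_equal_heuristic_intent_classification_py := by
  intro domain _
  unfold Spec_heuristic_intent_classification_py
  unfold heuristic_intent_classification_py heuristic_intent_classification_py_alt
  have hc : ∀ s, s ∈ pvVocab → PySem.Set.contains (pvFound domain.toList) s = PySem.Str.isIn s domain := by
    intro s hs
    rw [pv_contains_found _ _ hs]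
    simp
  have hfilt : ∀ g : List String, (∀ s ∈ g, s ∈ pvVocab) →
      g.filter (fun s => PySem.Set.contains (pvFound domain.toList) s) =
      g.filter (fun s => PySem.Str.isIn s domain) :=
    fun g hg => List.filter_congr (fun s hs => by rw [hc s (hg s hs)])
  have hany : ∀ g : List String, (∀ s ∈ g, s ∈ pvVocab) →
      g.any (fun s => PySem.Set.contains (pvFound domain.toList) s) =
      g.any (fun s => PySem.Str.isIn s domain) := by
    intro g hg
    rw [any_eq_not_isEmpty_filter, any_eq_not_isEmpty_filter, hfilt g hg]
  have hvE : ∀ s ∈ (["blog", "magazine", "news", "journal", "review", "opinion", "editorial"] : List String), s ∈ pvVocab := by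
    intro s hs; rw [pv_vocab_mem]; tauto
  have hvR : ∀ s ∈ (["resource", "links", "directory", "curation", "collection", "best", "top"] : List String), s ∈ pvVocab := by
    intro s hs; rw [pv_vocab_mem]; tauto
  have hvD : ∀ s ∈ (["directory", "list", "business", "yellowpages", "catalog"] : List String), s ∈ pvVocab := by
    intro s hs; rw [pv_vocab_mem]; tauto
  have hvV : ∀ s ∈ (["review", "rating", "testimonial", "trustpilot", "g2", "capterra"] : List String), s ∈ pvVocab := by
    intro s hs; rw [pv_vocab_mem]; tauto
  simp only [List.find?, bycat_review, bycat_directory, bycat_editorial, bycat_resource]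
  simp only [hany _ hvE, hany _ hvR, hany _ hvD, hany _ hvV]
  simp only [PySem.List.foldl_append_if, pvSignalTable, List.flatMap_cons, List.flatMap_nil]
  simp only [hfilt _ hvE, hfilt _ hvR, hfilt _ hvD, hfilt _ hvV,
    pv_found_isEmpty, cat_editorial, cat_resource, cat_directory, cat_review]
  have hbridge : ∀ s : String, PySem.Chars.isIn s.toList domain.toList = PySem.Str.isIn s domain := by
    intro s; simp
  simp only [hbridge, any_eq_not_isEmpty_filter]
  generalize (List.filter (fun s => PySem.Str.isIn s domain) ["blog", "magazine", "news", "journal", "review", "opinion", "editorial"]) = fE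
  generalize (List.filter (fun s => PySem.Str.isIn s domain) ["resource", "links", "directory", "curation", "collection", "best", "top"]) = fR
  generalize (List.filter (fun s => PySem.Str.isIn s domain) ["directory", "list", "business", "yellowpages", "catalog"]) = fD
  generalize (List.filter (fun s => PySem.Str.isIn s domain) ["review", "rating", "testimonial", "trustpilot", "g2", "capterra"]) = fV
  by_cases hE : fE.isEmpty <;> by_cases hR : fR.isEmpty <;>
  by_cases hD : fD.isEmpty <;> by_cases hV : fV.isEmpty <;>
  simp [hE, hR, hD, hV]
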